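-- pv_equiv track=rewrite | github.com/IAmNotAndrey/Algorithms_course_2 | gauss.py | shift_zero_rows_down
-- ===== SOURCE A (Python) =====
-- def bubble_sort(arr):
--     # num_comp = 0
--     num_moves = 0
--     len_arr = len(arr)
--     for i in range(len_arr):
--         for j in range(0, len_arr - 1 - i):
--             # num_comp += 1
--             if arr[j] > arr[j + 1]:
--                 num_moves += 1
--                 arr[j], arr[j + 1] = arr[j + 1], arr[j]
--     return arr, num_moves
--
-- def shift_zero_rows_down(matrix):
-- 	'''Возврат:\n
-- 	new_matrix, num_moves
-- 	'''
-- 	new_matrix = []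
-- 	for row in matrix:
-- 		zeros_num = 0
-- 		for i in row:
-- 			if i == 0:
-- 				zeros_num += 1
-- 			else:
-- 				break
-- 		new_matrix.append((zeros_num, row))
-- 	r_matrix, num_moves = bubble_sort(new_matrix)
-- 	new_matrix = [i[1] for i in r_matrix]
-- 	return new_matrix, num_moves
-- ===== SOURCE B (Python) =====
-- def _leading_zeros(row):
--     return next((i for i, v in enumerate(row) if v != 0), len(row))
--
-- def _msort(a):
--     if len(a) <= 1:
--         return list(a), 0
--     mid = len(a) // 2
--     left, cl = _msort(a[:mid])
--     right, cr = _msort(a[mid:])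
--     merged = []
--     i = j = 0
--     cm = 0
--     while i < len(left) and j < len(right):
--         if left[i] > right[j]:
--             merged.append(right[j])
--             j += 1
--             cm += len(left) - i
--         else:
--             merged.append(left[i])
--             i += 1
--     merged.extend(left[i:])
--     merged.extend(right[j:])
--     return merged, cl + cr + cm
--
-- def shift_zero_rows_down(matrix):
--     keyed = [(_leading_zeros(row), row) for row in matrix]
--     sorted_keyed, inversions = _msort(keyed)
--     return [row for _, row in sorted_keyed], inversions
-- ===== Notes on version B (the rewrite author's own statement) =====
-- stated objective: faster
-- what changed: Replaced the O(n^2) bubble sort over (leading-zeros, row) keys by a stable merge sort that counts inversions during the merge, which equals the bubble sort's swap count; the leading-zeros key is computed with next/enumerate instead of a manual break loop.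
import Mathlib
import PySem

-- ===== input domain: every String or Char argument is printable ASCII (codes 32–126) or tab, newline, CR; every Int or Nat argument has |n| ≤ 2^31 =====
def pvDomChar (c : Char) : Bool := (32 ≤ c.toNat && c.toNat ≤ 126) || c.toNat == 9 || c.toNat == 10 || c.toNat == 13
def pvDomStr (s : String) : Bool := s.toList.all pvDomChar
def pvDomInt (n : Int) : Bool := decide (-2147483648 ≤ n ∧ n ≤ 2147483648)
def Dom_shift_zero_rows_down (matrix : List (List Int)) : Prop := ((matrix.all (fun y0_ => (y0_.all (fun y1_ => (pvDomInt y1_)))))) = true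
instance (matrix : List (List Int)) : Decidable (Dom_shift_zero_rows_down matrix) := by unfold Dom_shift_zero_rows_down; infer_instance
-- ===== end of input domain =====

-- B replaces A's O(n^2) bubble sort of (leading-zeros, row) keys by an O(n log n) merge sort
-- that counts inversions during the merge (= A's swap count); return value only, neither mutates.

-- ===== PORT A =====

-- Python `>` on the (int, list) tuples A sorts: list lexicographic `<`, then tuple compare.
def ltL : List Int → List Int → Bool
  | [], [] => false
  | [], _ :: _ => true
  | _ :: _, [] => false
  | x :: xs, y :: ys => if x < y then true else if x = y then ltL xs ys else false

def gtK : (Int × List Int) → (Int × List Int) → Bool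
  | (a, r), (b, s) => if b < a then true else if a = b then ltL s r else false

-- A's inner loop body: `if arr[j] > arr[j+1]: num_moves += 1; swap` (indices always in range here)
def stepA (st : List (Int × List Int) × Int) (j : Int) : List (Int × List Int) × Int :=
  let a := PySem.List.pyGetD st.1 j (0, [])
  let b := PySem.List.pyGetD st.1 (j + 1) (0, [])
  if gtK a b then
    (PySem.List.pySetD (PySem.List.pySetD st.1 j b) (j + 1) a, st.2 + 1)
  else st

def bubble_sort (arr : List (Int × List Int)) : List (Int × List Int) × Int :=
  let len_arr : Int := arr.length
  (PySem.List.pyRange 0 len_arr 1).foldl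
    (fun st i => (PySem.List.pyRange 0 (len_arr - 1 - i) 1).foldl stepA st)
    (arr, 0)

-- A's `zeros_num` loop with `break`
def countLead : List Int → Int
  | [] => 0
  | x :: t => if x = 0 then countLead t + 1 else 0

def shift_zero_rows_down (matrix : List (List Int)) : List (List Int) × Int :=
  let new_matrix := matrix.foldl (fun acc row => acc ++ [(countLead row, row)]) []
  let r := bubble_sort new_matrix
  (r.1.map (fun i => i.2), r.2)

-- ===== PORT B =====

-- B's merge while-loop (two pointers) as the standard structural recursion on the two lists;
-- `cm += len(left) - i` is the length of the remaining left part.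
def mergeB : List (Int × List Int) → List (Int × List Int) → List (Int × List Int) × Int
  | [], r => (r, 0)
  | a :: l, [] => (a :: l, 0)
  | a :: l, b :: r =>
    if gtK a b then
      let p := mergeB (a :: l) r
      (b :: p.1, p.2 + ((a :: l).length : Int))
    else
      let p := mergeB l (b :: r)
      (a :: p.1, p.2)
termination_by l r => l.length + r.length

def msortB (a : List (Int × List Int)) : List (Int × List Int) × Int :=
  if h : a.length ≤ 1 then (a, 0)
  else
    let mid := a.length / 2
    let L := msortB (a.take mid)
    let R := msortB (a.drop mid)
    let M := mergeB L.1 R.1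
    (M.1, L.2 + R.2 + M.2)
termination_by a.length
decreasing_by
  · simp only [List.length_take]; omega
  · simp only [List.length_drop]; omega

def shift_zero_rows_down_alt (matrix : List (List Int)) : List (List Int) × Int :=
  -- `next((i for i, v in enumerate(row) if v != 0), len(row))` is List.findIdx
  let keyed := matrix.map (fun row => ((row.findIdx (fun v => v ≠ 0) : Int), row))
  let s := msortB keyed
  (s.1.map (fun p => p.2), s.2)

-- ===== PRECONDITION & SPEC =====
def Spec_shift_zero_rows_down (matrix : List (List Int)) (out : List (List Int) × Int) : Prop := out = shift_zero_rows_down_alt matrix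
instance (matrix : List (List Int)) (out : List (List Int) × Int) : Decidable (Spec_shift_zero_rows_down matrix out) := by unfold Spec_shift_zero_rows_down; infer_instance

-- ===== CLAIM (what is proved, stated in full; the proofs are below) =====
def Claim_equal_shift_zero_rows_down : Prop := ∀ (matrix : List (List Int)), Dom_shift_zero_rows_down matrix → Spec_shift_zero_rows_down matrix (shift_zero_rows_down matrix)

-- ===== LEMMAS AND PROOFS =====

-- ---- order lemmas ----
theorem ltL_asymm : ∀ a b : List Int, ltL a b = true → ltL b a = false := by
  intro a
  induction a with
  | nil => intro b _; cases b <;> simp [ltL]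
  | cons x xs ih =>
    intro b h
    cases b with
    | nil => simp [ltL] at h
    | cons y ys =>
      simp only [ltL] at h ⊢
      split_ifs at h ⊢ with h1 h2 h3 h4 <;> try omega
      all_goals first | rfl | (exact ih ys h) | (simp_all) | omega

theorem ltL_trans : ∀ a b c : List Int, ltL a b = true → ltL b c = true → ltL a c = true := by
  intro a
  induction a with
  | nil =>
    intro b c h1 h2
    cases b <;> cases c <;> simp_all [ltL]
  | cons x xs ih =>
    intro b c h1 h2
    cases b with
    | nil => simp [ltL] at h1
    | cons y ys =>
      cases c with
      | nil => simp [ltL] at h2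
      | cons z zs =>
        simp only [ltL] at h1 h2 ⊢
        split_ifs at h1 h2 ⊢ with h' <;> try rfl
        all_goals (first | omega | exact ih ys zs (by omega <;> assumption) h2 | skip)
        all_goals first
          | (exact ih ys zs h1 h2)
          | omega
          | (subst_vars; omega)
          | simp_all

theorem ltL_conn : ∀ a b : List Int, ltL a b = false → ltL b a = false → a = b := by
  intro a
  induction a with
  | nil => intro b h1 _; cases b <;> simp_all [ltL]
  | cons x xs ih =>
    intro b h1 h2
    cases b with
    | nil => simp [ltL] at h2
    | cons y ys =>
      simp only [ltL] at h1 h2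
      split_ifs at h1 h2 <;> try omega
      subst_vars
      rw [ih ys h1 h2]

theorem gtK_asymm {a b : Int × List Int} (h : gtK a b = true) : gtK b a = false := by
  obtain ⟨a1, a2⟩ := a; obtain ⟨b1, b2⟩ := b
  simp only [gtK] at h ⊢
  split_ifs at h ⊢ <;> first | omega | exact ltL_asymm _ _ h | simp_all

theorem gtK_irrefl (a : Int × List Int) : gtK a a = false := by
  by_cases h : gtK a a = true
  · exact gtK_asymm h
  · simpa using h

theorem gtK_trans {a b c : Int × List Int} (h1 : gtK a b = true) (h2 : gtK b c = true) :
    gtK a c = true := by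
  obtain ⟨a1, a2⟩ := a; obtain ⟨b1, b2⟩ := b; obtain ⟨c1, c2⟩ := c
  simp only [gtK] at h1 h2 ⊢
  split_ifs at h1 h2 ⊢ <;> first | omega | exact ltL_trans _ _ _ h2 h1 | simp_all

theorem gtK_conn {a b : Int × List Int} (h1 : gtK a b = false) (h2 : gtK b a = false) : a = b := by
  obtain ⟨a1, a2⟩ := a; obtain ⟨b1, b2⟩ := b
  simp only [gtK] at h1 h2
  split_ifs at h1 h2 <;> try omega
  have := ltL_conn _ _ h2 h1
  subst_vars; rfl

theorem leK_trans {a b c : Int × List Int} (h1 : gtK a b = false) (h2 : gtK b c = false) :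
    gtK a c = false := by
  by_contra h
  rw [Bool.not_eq_false] at h
  by_cases hba : gtK b a = true
  · have := gtK_trans hba h; simp_all
  · have : a = b := gtK_conn h1 (by simpa using hba)
    subst this; simp_all

theorem gt_of_le_of_gt {a a' b : Int × List Int} (h1 : gtK a a' = false) (h2 : gtK a b = true) :
    gtK a' b = true := by
  by_cases h : gtK a' a = true
  · exact gtK_trans h h2
  · have : a = a' := gtK_conn h1 (by simpa using h)
    subst this; exact h2

-- ---- inversions ----
def invK : List (Int × List Int) → Int
  | [] => 0
  | x :: t => (t.countP (fun y => gtK x y) : Int) + invK t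

def crossK (l r : List (Int × List Int)) : Int :=
  (l.map (fun a => ((r.countP (fun b => gtK a b) : Nat) : Int))).sum

theorem inv_sorted_zero {l : List (Int × List Int)}
    (h : l.Pairwise (fun a b => gtK a b = false)) : invK l = 0 := by
  induction l with
  | nil => rfl
  | cons x t ih =>
    rw [List.pairwise_cons] at h
    have hc : t.countP (fun y => gtK x y) = 0 := by
      rw [List.countP_eq_zero]
      intro y hy; simpa using h.1 y hy
    simp [invK, hc, ih h.2]

theorem inv_append (l r : List (Int × List Int)) :
    invK (l ++ r) = invK l + invK r + crossK l r := by
  induction l with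
  | nil => simp [invK, crossK]
  | cons x t ih =>
    simp only [List.cons_append, invK, List.countP_append, crossK, List.map_cons, List.sum_cons] at *
    push_cast
    omega

-- ---- bubble side: one passA ----
def passA : Nat → List (Int × List Int) → List (Int × List Int) × Int
  | 0, l => (l, 0)
  | _ + 1, [] => ([], 0)
  | _ + 1, [x] => ([x], 0)
  | m + 1, x :: y :: t =>
    if gtK x y then
      let p := passA m (x :: t)
      (y :: p.1, p.2 + 1)
    else
      let p := passA m (y :: t)
      (x :: p.1, p.2)

theorem passA_gt {x y : Int × List Int} {t : List (Int × List Int)} (m : Nat)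
    (h : gtK x y = true) :
    passA (m + 1) (x :: y :: t) = (y :: (passA m (x :: t)).1, (passA m (x :: t)).2 + 1) := by
  simp [passA, h]

theorem passA_le {x y : Int × List Int} {t : List (Int × List Int)} (m : Nat)
    (h : gtK x y = false) :
    passA (m + 1) (x :: y :: t) = (x :: (passA m (y :: t)).1, (passA m (y :: t)).2) := by
  simp [passA, h]

theorem pass_perm : ∀ (m : Nat) (l : List (Int × List Int)), (passA m l).1.Perm l := by
  intro m
  induction m with
  | zero => intro l; simp [passA]
  | succ m ih =>
    intro l
    match l with
    | [] => simp [passA]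
    | [x] => simp [passA]
    | x :: y :: t =>
      simp only [passA]
      split_ifs with h
      · exact ((ih (x :: t)).cons y).trans (List.Perm.swap x y t)
      · exact (ih (y :: t)).cons x

theorem pass_length (m : Nat) (l : List (Int × List Int)) :
    (passA m l).1.length = l.length := (pass_perm m l).length_eq

theorem pass_inv : ∀ (m : Nat) (l : List (Int × List Int)),
    invK (passA m l).1 + (passA m l).2 = invK l := by
  intro m
  induction m with
  | zero => intro l; simp [passA]
  | succ m ih =>
    intro l
    match l with
    | [] => simp [passA]
    | [x] => simp [passA]
    | x :: y :: t =>
      simp only [passA]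
      split_ifs with h
      · have hperm := pass_perm m (x :: t)
        have hcnt : (passA m (x :: t)).1.countP (fun z => gtK y z)
            = (x :: t).countP (fun z => gtK y z) := hperm.countP_eq _
        have hyx : gtK y x = false := gtK_asymm h
        have ihx := ih (x :: t)
        simp only [invK, hcnt, List.countP_cons, hyx] at *
        simp only [h] at *
        push_cast at *
        omega
      · have hperm := pass_perm m (y :: t)
        have hcnt : (passA m (y :: t)).1.countP (fun z => gtK x z)
            = (y :: t).countP (fun z => gtK x z) := hperm.countP_eq _
        have hxy : gtK x y = false := by simpa using h
        have ihy := ih (y :: t)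
        simp only [invK, hcnt, List.countP_cons, hxy] at *
        push_cast at *
        omega

theorem pass_append : ∀ (m : Nat) (l t : List (Int × List Int)), m + 1 ≤ l.length →
    passA m (l ++ t) = ((passA m l).1 ++ t, (passA m l).2) := by
  intro m
  induction m with
  | zero => intro l t _; simp [passA]
  | succ m ih =>
    intro l t hl
    match l, hl with
    | x :: y :: u, hl =>
      simp only [List.length_cons] at hl
      simp only [List.cons_append, passA]
      split_ifs with h
      · have := ih (x :: u) t (by simp only [List.length_cons]; omega)
        simp only [List.cons_append] at this
        simp [this]
      · have := ih (y :: u) t (by simp only [List.length_cons]; omega)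
        simp only [List.cons_append] at this
        simp [this]

theorem pass_max : ∀ (m : Nat) (l : List (Int × List Int)), l.length = m + 1 →
    ∃ init z, (passA m l).1 = init ++ [z] ∧ ∀ w ∈ l, gtK w z = false := by
  intro m
  induction m with
  | zero =>
    intro l hl
    match l, hl with
    | [x], _ => exact ⟨[], x, by simp [passA], by simp [gtK_irrefl]⟩
  | succ m ih =>
    intro l hl
    match l, hl with
    | x :: y :: t, hl =>
      simp only [List.length_cons] at hl
      simp only [passA]
      split_ifs with h
      · obtain ⟨init, z, h1, h2⟩ := ih (x :: t) (by simp only [List.length_cons]; omega)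
        refine ⟨y :: init, z, by simp [h1], ?_⟩
        intro w hw
        rcases List.mem_cons.1 hw with rfl | hw'
        · exact h2 w (by simp)
        rcases List.mem_cons.1 hw' with rfl | hw''
        · by_contra hc
          rw [Bool.not_eq_false] at hc
          have := gtK_trans h hc
          have := h2 x (by simp)
          simp_all
        · exact h2 w (by simp [hw''])
      · obtain ⟨init, z, h1, h2⟩ := ih (y :: t) (by simp only [List.length_cons]; omega)
        refine ⟨x :: init, z, by simp [h1], ?_⟩
        intro w hw
        rcases List.mem_cons.1 hw with rfl | hw'
        · exact leK_trans (by simpa using h) (h2 y (by simp))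
        · exact h2 w hw'

-- ---- bubble side: the whole sort ----
def bubAux : Nat → List (Int × List Int) → List (Int × List Int) × Int
  | 0, l => (l, 0)
  | f + 1, l =>
    let p := passA (f + 1) l
    let q := bubAux f p.1
    (q.1, p.2 + q.2)

theorem bubAux_step (d : Nat) (l : List (Int × List Int)) :
    bubAux d l = ((bubAux (d - 1) (passA d l).1).1,
                  (passA d l).2 + (bubAux (d - 1) (passA d l).1).2) := by
  match d with
  | 0 => simp [bubAux, passA]
  | f + 1 => simp [bubAux]

theorem bubAux_perm : ∀ (f : Nat) (l : List (Int × List Int)), (bubAux f l).1.Perm l := by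
  intro f
  induction f with
  | zero => intro l; simp [bubAux]
  | succ f ih => intro l; exact (ih _).trans (pass_perm _ _)

theorem bubAux_inv : ∀ (f : Nat) (l : List (Int × List Int)),
    invK (bubAux f l).1 + (bubAux f l).2 = invK l := by
  intro f
  induction f with
  | zero => intro l; simp [bubAux]
  | succ f ih =>
    intro l
    have h1 := ih (passA (f + 1) l).1
    have h2 := pass_inv (f + 1) l
    simp only [bubAux]
    omega

theorem bubAux_append : ∀ (f : Nat) (a t : List (Int × List Int)), f + 1 ≤ a.length →
    bubAux f (a ++ t) = ((bubAux f a).1 ++ t, (bubAux f a).2) := by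
  intro f
  induction f with
  | zero => intro a t _; simp [bubAux]
  | succ f ih =>
    intro a t ha
    simp only [bubAux]
    rw [pass_append (f + 1) a t ha]
    rw [ih (passA (f + 1) a).1 t (by rw [pass_length]; omega)]

theorem bubAux_sorted : ∀ (f : Nat) (l : List (Int × List Int)), l.length ≤ f + 1 →
    (bubAux f l).1.Pairwise (fun a b => gtK a b = false) := by
  intro f
  induction f with
  | zero =>
    intro l hl
    match l, hl with
    | [], _ => simp [bubAux]
    | [x], _ => simp [bubAux]
  | succ f ih =>
    intro l hl
    simp only [bubAux]
    by_cases hsmall : l.length ≤ f + 1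
    · exact ih _ (by rw [pass_length]; omega)
    · have hlen : l.length = (f + 1) + 1 := by omega
      obtain ⟨init, z, h1, h2⟩ := pass_max (f + 1) l hlen
      have hinit : init.length = f + 1 := by
        have := pass_length (f + 1) l
        rw [h1] at this; simp at this; omega
      rw [h1, bubAux_append f init [z] (by omega)]
      have hsort : (bubAux f init).1.Pairwise (fun a b => gtK a b = false) :=
        ih init (by omega)
      rw [List.pairwise_append]
      refine ⟨hsort, by simp, ?_⟩
      intro w hw z' hz'
      rcases List.mem_singleton.1 hz' with rfl
      have hwinit : w ∈ init := (bubAux_perm f init).mem_iff.1 hw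
      have hwl : w ∈ l := (pass_perm (f + 1) l).mem_iff.1 (by rw [h1]; simp [hwinit])
      exact h2 w hwl

theorem bubAux_count (f : Nat) (l : List (Int × List Int)) (hl : l.length ≤ f + 1) :
    (bubAux f l).2 = invK l := by
  have h1 := bubAux_inv f l
  have h2 := inv_sorted_zero (bubAux_sorted f l hl)
  omega

-- ---- bridging the index loops of port A to passA/bubAux ----
theorem getD_append_length (pre : List (Int × List Int)) (w : Int × List Int)
    (ws : List (Int × List Int)) (d : Int × List Int) :
    (pre ++ w :: ws).getD pre.length d = w := by
  simp [List.getD, List.getElem?_append_right (Nat.le_refl pre.length)]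

theorem set_append_length (pre : List (Int × List Int)) (w : Int × List Int)
    (ws : List (Int × List Int)) (v : Int × List Int) :
    (pre ++ w :: ws).set pre.length v = pre ++ v :: ws := by
  induction pre with
  | nil => simp
  | cons p ps ih => simp [List.set, ih]

theorem inner_loop_eq_pass : ∀ (m : Nat) (pre rest : List (Int × List Int)) (c : Int),
    m + 1 ≤ rest.length →
    (PySem.List.pyRange (pre.length : Int) ((pre.length : Int) + (m : Int)) 1).foldl stepA
      (pre ++ rest, c)
    = (pre ++ (passA m rest).1, c + (passA m rest).2) := by
  intro m
  induction m with
  | zero =>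
    intro pre rest c _
    rw [PySem.List.pyRange_one_eq_nil (by omega)]
    simp [passA]
  | succ m ih =>
    intro pre rest c hrest
    match rest, hrest with
    | x :: y :: t, hrest =>
      simp only [List.length_cons] at hrest
      rw [PySem.List.pyRange_one_cons (by push_cast; omega)]
      simp only [List.foldl_cons]
      have hga : PySem.List.pyGetD (pre ++ x :: y :: t) (pre.length : Int) (0, []) = x := by
        rw [PySem.List.pyGetD_natCast, getD_append_length]
      have hcast : ((pre.length : Int) + 1) = (((pre.length + 1 : Nat)) : Int) := by push_cast; ring
      have hgb : PySem.List.pyGetD (pre ++ x :: y :: t) ((pre.length : Int) + 1) (0, []) = y := by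
        rw [hcast, PySem.List.pyGetD_natCast]
        have : pre ++ x :: y :: t = (pre ++ [x]) ++ y :: t := by simp
        rw [this]
        have hl : (pre ++ [x]).length = pre.length + 1 := by simp
        rw [← hl, getD_append_length]
      simp only [stepA, hga, hgb]
      split_ifs with h
      · -- swap x and y
        have hs1 : PySem.List.pySetD (pre ++ x :: y :: t) (pre.length : Int) y
            = pre ++ y :: y :: t := by
          rw [PySem.List.pySetD_natCast, set_append_length]
        have hs2 : PySem.List.pySetD (pre ++ y :: y :: t) ((pre.length : Int) + 1) x
            = pre ++ y :: x :: t := by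
          rw [hcast, PySem.List.pySetD_natCast]
          have e1 : pre ++ y :: y :: t = (pre ++ [y]) ++ y :: t := by simp
          have e2 : pre ++ y :: x :: t = (pre ++ [y]) ++ x :: t := by simp
          rw [e1, e2]
          have hl : (pre ++ [y]).length = pre.length + 1 := by simp
          rw [← hl, set_append_length]
        rw [hs1, hs2]
        have e3 : pre ++ y :: x :: t = (pre ++ [y]) ++ x :: t := by simp
        rw [e3]
        have hrange : PySem.List.pyRange ((pre.length : Int) + 1)
              ((pre.length : Int) + ((m + 1 : Nat) : Int)) 1
            = PySem.List.pyRange (((pre ++ [y]).length : Nat) : Int)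
              ((((pre ++ [y]).length : Nat) : Int) + (m : Int)) 1 := by
          congr 1 <;> (simp; try push_cast; try omega)
        rw [hrange, ih (pre ++ [y]) (x :: t) (c + 1) (by simp only [List.length_cons]; omega)]
        rw [passA_gt m h]
        rw [Prod.ext_iff]
        refine ⟨by simp, ?_⟩
        show c + 1 + (passA m (x :: t)).2 = c + ((passA m (x :: t)).2 + 1)
        ring
      · have hrange : PySem.List.pyRange ((pre.length : Int) + 1)
              ((pre.length : Int) + ((m + 1 : Nat) : Int)) 1
            = PySem.List.pyRange (((pre ++ [x]).length : Nat) : Int)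
              ((((pre ++ [x]).length : Nat) : Int) + (m : Int)) 1 := by
          congr 1 <;> (simp; try push_cast; try omega)
        have e1 : pre ++ x :: y :: t = (pre ++ [x]) ++ y :: t := by simp
        rw [e1, hrange, ih (pre ++ [x]) (y :: t) c (by simp only [List.length_cons]; omega)]
        rw [passA_le m (by simpa using h)]
        rw [Prod.ext_iff]
        refine ⟨by simp, ?_⟩
        show c + (passA m (y :: t)).2 = c + (passA m (y :: t)).2
        rfl

theorem outer_loop_eq_bubAux : ∀ (d j n : Nat) (l : List (Int × List Int)) (c : Int),
    j + d = n → l.length = n →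
    (PySem.List.pyRange (j : Int) (n : Int) 1).foldl
      (fun st i => (PySem.List.pyRange 0 ((n : Int) - 1 - i) 1).foldl stepA st) (l, c)
    = ((bubAux (d - 1) l).1, c + (bubAux (d - 1) l).2) := by
  intro d
  induction d with
  | zero =>
    intro j n l c hj _
    rw [PySem.List.pyRange_one_eq_nil (by omega)]
    simp [bubAux]
  | succ d ih =>
    intro j n l c hj hl
    rw [PySem.List.pyRange_one_cons (by push_cast; omega)]
    simp only [List.foldl_cons]
    have he : (n : Int) - 1 - (j : Int) = (d : Int) := by push_cast; omega
    have hinner := inner_loop_eq_pass d [] l c (by omega)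
    simp only [List.length_nil, Nat.cast_zero, List.nil_append, zero_add] at hinner
    rw [he, hinner]
    have hnext := ih (j + 1) n (passA d l).1 (c + (passA d l).2)
      (by omega) (by rw [pass_length]; omega)
    push_cast at hnext ⊢
    rw [hnext]
    rw [bubAux_step d l]
    rw [Prod.ext_iff]
    refine ⟨rfl, ?_⟩
    show c + (passA d l).2 + (bubAux (d - 1) (passA d l).1).2
        = c + ((passA d l).2 + (bubAux (d - 1) (passA d l).1).2)
    ring

theorem bubble_sort_eq (arr : List (Int × List Int)) :
    bubble_sort arr = ((bubAux (arr.length - 1) arr).1, (bubAux (arr.length - 1) arr).2) := by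
  have := outer_loop_eq_bubAux arr.length 0 arr.length arr 0 (by omega) rfl
  simp only [Nat.cast_zero, zero_add] at this
  simpa [bubble_sort] using this

-- ---- merge side ----
theorem mergeB_gt {a b : Int × List Int} {l r : List (Int × List Int)}
    (h : gtK a b = true) :
    mergeB (a :: l) (b :: r)
      = (b :: (mergeB (a :: l) r).1, (mergeB (a :: l) r).2 + ((a :: l).length : Int)) := by
  simp [mergeB, h]

theorem mergeB_le {a b : Int × List Int} {l r : List (Int × List Int)}
    (h : gtK a b = false) :
    mergeB (a :: l) (b :: r) = (a :: (mergeB l (b :: r)).1, (mergeB l (b :: r)).2) := by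
  simp [mergeB, h]

theorem mergeB_perm : ∀ (l r : List (Int × List Int)), (mergeB l r).1.Perm (l ++ r) := by
  intro l r
  induction l, r using mergeB.induct with
  | case1 r => simp [mergeB]
  | case2 a l => simp [mergeB]
  | case3 a l b r h ih =>
    rw [mergeB_gt h]
    exact (ih.cons b).trans List.perm_middle.symm
  | case4 a l b r h ih =>
    rw [mergeB_le (by simpa using h)]
    exact (ih.cons a).trans (by simp)

theorem mergeB_sorted : ∀ (l r : List (Int × List Int)),
    l.Pairwise (fun a b => gtK a b = false) → r.Pairwise (fun a b => gtK a b = false) →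
    (mergeB l r).1.Pairwise (fun a b => gtK a b = false) := by
  intro l r
  induction l, r using mergeB.induct with
  | case1 r => intro _ hr; simpa [mergeB] using hr
  | case2 a l => intro hl _; simpa [mergeB] using hl
  | case3 a l b r h ih =>
    intro hl hr
    rw [List.pairwise_cons] at hr
    rw [mergeB_gt h]
    rw [List.pairwise_cons]
    refine ⟨?_, ih hl hr.2⟩
    intro w hw
    have hw' : w ∈ (a :: l) ++ r := (mergeB_perm (a :: l) r).mem_iff.1 hw
    have hba : gtK b a = false := gtK_asymm h
    rcases List.mem_append.1 hw' with hwl | hwr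
    · rcases List.mem_cons.1 hwl with rfl | hwl'
      · exact hba
      · rw [List.pairwise_cons] at hl
        exact leK_trans hba (hl.1 w hwl')
    · exact hr.1 w hwr
  | case4 a l b r h ih =>
    intro hl hr
    rw [List.pairwise_cons] at hl
    rw [mergeB_le (by simpa using h)]
    rw [List.pairwise_cons]
    refine ⟨?_, ih hl.2 hr⟩
    intro w hw
    have hw' : w ∈ l ++ (b :: r) := (mergeB_perm l (b :: r)).mem_iff.1 hw
    have hab : gtK a b = false := by simpa using h
    rcases List.mem_append.1 hw' with hwl | hwr
    · exact hl.1 w hwl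
    · rcases List.mem_cons.1 hwr with rfl | hwr'
      · exact hab
      · rw [List.pairwise_cons] at hr
        exact leK_trans hab (hr.1 w hwr')

theorem cross_cons_left (a : Int × List Int) (l r : List (Int × List Int)) :
    crossK (a :: l) r = ((r.countP (fun b => gtK a b) : Nat) : Int) + crossK l r := by
  simp [crossK]

theorem cross_cons_right (l : List (Int × List Int)) (b : Int × List Int)
    (r : List (Int × List Int)) :
    crossK l (b :: r) = crossK l r + ((l.countP (fun w => gtK w b) : Nat) : Int) := by
  induction l with
  | nil => simp [crossK]
  | cons a l ih =>
    rw [cross_cons_left, cross_cons_left, ih]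
    simp only [List.countP_cons]
    push_cast
    split_ifs <;> ring

theorem mergeB_count : ∀ (l r : List (Int × List Int)),
    l.Pairwise (fun a b => gtK a b = false) → r.Pairwise (fun a b => gtK a b = false) →
    (mergeB l r).2 = crossK l r := by
  intro l r
  induction l, r using mergeB.induct with
  | case1 r => intro _ _; simp [mergeB, crossK]
  | case2 a l => intro _ _; simp [mergeB, crossK]
  | case3 a l b r h ih =>
    intro hl hr
    rw [List.pairwise_cons] at hr
    rw [mergeB_gt h]
    have hc := ih hl hr.2
    have hall : (a :: l).countP (fun w => gtK w b) = (a :: l).length := by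
      rw [List.countP_eq_length]
      intro w hw
      rcases List.mem_cons.1 hw with rfl | hw'
      · simpa using h
      · rw [List.pairwise_cons] at hl
        simpa using gt_of_le_of_gt (hl.1 w hw') h
    rw [cross_cons_right, hall, hc]
  | case4 a l b r h ih =>
    intro hl hr
    rw [List.pairwise_cons] at hl
    rw [mergeB_le (by simpa using h)]
    have hc := ih hl.2 hr
    have hab : gtK a b = false := by simpa using h
    have hz : (b :: r).countP (fun w => gtK a w) = 0 := by
      rw [List.countP_eq_zero]
      intro w hw
      rcases List.mem_cons.1 hw with rfl | hw'
      · simpa using hab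
      · rw [List.pairwise_cons] at hr
        simpa using leK_trans hab (hr.1 w hw')
    rw [cross_cons_left, hz, hc]
    simp

theorem cross_perm_left {l l' : List (Int × List Int)} (h : l.Perm l')
    (r : List (Int × List Int)) : crossK l r = crossK l' r := by
  unfold crossK
  exact (h.map _).sum_eq

theorem cross_perm_right (l : List (Int × List Int)) {r r' : List (Int × List Int)}
    (h : r.Perm r') : crossK l r = crossK l r' := by
  unfold crossK
  congr 1
  apply List.map_congr_left
  intro a _
  rw [h.countP_eq]

theorem msortB_correct : ∀ (a : List (Int × List Int)),
    (msortB a).1.Pairwise (fun a b => gtK a b = false) ∧ (msortB a).1.Perm a ∧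
    (msortB a).2 = invK a := by
  intro a
  induction a using msortB.induct with
  | case1 a h =>
    rw [msortB, dif_pos h]
    match a, h with
    | [], _ => exact ⟨by simp, by simp, by simp [invK]⟩
    | [x], _ => exact ⟨by simp, by simp, by simp [invK]⟩
  | case2 a h mid ihL ihR =>
    have ihL' : (msortB (a.take (a.length / 2))).1.Pairwise (fun a b => gtK a b = false) ∧
        (msortB (a.take (a.length / 2))).1.Perm (a.take (a.length / 2)) ∧
        (msortB (a.take (a.length / 2))).2 = invK (a.take (a.length / 2)) := ihL
    have ihR' : (msortB (a.drop (a.length / 2))).1.Pairwise (fun a b => gtK a b = false) ∧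
        (msortB (a.drop (a.length / 2))).1.Perm (a.drop (a.length / 2)) ∧
        (msortB (a.drop (a.length / 2))).2 = invK (a.drop (a.length / 2)) := ihR
    obtain ⟨sL, pL, cL⟩ := ihL'
    obtain ⟨sR, pR, cR⟩ := ihR' 
    have hunf : msortB a =
        ((mergeB (msortB (a.take (a.length / 2))).1 (msortB (a.drop (a.length / 2))).1).1,
         (msortB (a.take (a.length / 2))).2 + (msortB (a.drop (a.length / 2))).2 +
         (mergeB (msortB (a.take (a.length / 2))).1 (msortB (a.drop (a.length / 2))).1).2) := by
      rw [msortB, dif_neg h]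
    rw [hunf]
    have hMs := mergeB_sorted _ _ sL sR
    have hMp := mergeB_perm (msortB (a.take (a.length / 2))).1 (msortB (a.drop (a.length / 2))).1
    have hMc := mergeB_count _ _ sL sR
    refine ⟨hMs, ?_, ?_⟩
    · exact hMp.trans ((pL.append pR).trans (by rw [List.take_append_drop]))
    · rw [hMc, cross_perm_left pL, cross_perm_right _ pR, cL, cR]
      have := inv_append (List.take (a.length / 2) a) (List.drop (a.length / 2) a)
      rw [List.take_append_drop] at this
      omega

-- ---- the two sorts agree ----
theorem sorts_agree (k : List (Int × List Int)) :
    (bubAux (k.length - 1) k).1 = (msortB k).1 ∧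
    (bubAux (k.length - 1) k).2 = (msortB k).2 := by
  have hlen : k.length ≤ (k.length - 1) + 1 := by omega
  have hbs := bubAux_sorted (k.length - 1) k hlen
  have hbp := bubAux_perm (k.length - 1) k
  obtain ⟨hms, hmp, hmc⟩ := msortB_correct k
  constructor
  · exact List.Perm.eq_of_pairwise (fun a _ b _ h1 h2 => gtK_conn h1 h2)
      hbs hms (hbp.trans hmp.symm)
  · rw [bubAux_count _ _ hlen, hmc]

-- ---- keys agree ----
theorem countLead_eq_findIdx (row : List Int) :
    countLead row = ((row.findIdx (fun v => v ≠ 0) : Nat) : Int) := by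
  induction row with
  | nil => simp [countLead]
  | cons x t ih =>
    rw [countLead, List.findIdx_cons]
    by_cases h : x = 0
    · simp [h, ih]
    · simp [h]

theorem keyed_eq (matrix : List (List Int)) :
    matrix.foldl (fun acc row => acc ++ [(countLead row, row)]) []
    = matrix.map (fun row => (((row.findIdx (fun v => v ≠ 0) : Nat) : Int), row)) := by
  rw [PySem.List.foldl_append_singleton_eq_map]
  apply List.map_congr_left
  intro row _
  rw [countLead_eq_findIdx]

-- ===== VERDICT (by name: the statement is the Claim_ definition above) =====
theorem shift_zero_rows_down_spec : Claim_equal_shift_zero_rows_down := by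
  intro matrix _
  unfold Spec_shift_zero_rows_down shift_zero_rows_down shift_zero_rows_down_alt
  simp only [keyed_eq, bubble_sort_eq]
  obtain ⟨h1, h2⟩ := sorts_agree
    (matrix.map (fun row => (((row.findIdx (fun v => v ≠ 0) : Nat) : Int), row)))
  rw [h1, h2]
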